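-- pv_equiv track=rewrite | github.com/irl/dnskeys | openpgp.py | parseOpenPGPFingerprintRecord
-- ===== SOURCE A (Python) =====
-- def parseOpenPGPFingerprintRecord(value):
--     """
--     Extract fingerprints from an OpenPGP fingerprint record's value.
--     """
--     parts = value.split(";")
--     fingerprint = None
--     uri = None
--     for part in parts:
--         if part[0:4] == "fpr=":
--             fingerprint = part[4:]
--         if part[0:4] == "uri=":
--             uri = part[4:]
--     if fingerprint == None:
--         return None, None
--     if uri == None:
--         return fingerprint, None
--     return fingerprint, uri
-- ===== SOURCE B (Python) =====
-- def parseOpenPGPFingerprintRecord(value):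
--     """
--     Extract fingerprints from an OpenPGP fingerprint record's value.
--     """
--     fields = {}
--     for part in value.split(";"):
--         i = part.find("=")
--         if i != -1:
--             fields[part[:i]] = part[i + 1:]
--     fingerprint = fields.get("fpr")
--     if fingerprint is None:
--         return None, None
--     return fingerprint, fields.get("uri")
-- ===== Notes on version B (the rewrite author's own statement) =====
-- stated objective: idiomatic
-- what changed: A scans each semicolon-separated part twice against the two literal four-character prefixes while threading two mutable variables; B instead splits every part at its first equals sign into a key-to-value dict in one pass and then simply looks up the fingerprint and uri keys.
import Mathlib
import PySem

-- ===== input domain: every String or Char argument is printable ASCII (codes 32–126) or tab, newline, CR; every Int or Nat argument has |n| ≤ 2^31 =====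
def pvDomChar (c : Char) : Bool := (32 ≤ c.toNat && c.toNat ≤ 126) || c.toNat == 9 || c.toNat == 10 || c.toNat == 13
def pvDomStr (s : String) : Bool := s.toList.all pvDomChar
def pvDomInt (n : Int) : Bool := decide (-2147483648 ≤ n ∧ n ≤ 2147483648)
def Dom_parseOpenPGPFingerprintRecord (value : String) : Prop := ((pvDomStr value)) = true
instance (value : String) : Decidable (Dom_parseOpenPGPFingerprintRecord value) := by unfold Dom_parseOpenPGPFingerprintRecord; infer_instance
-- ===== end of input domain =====

-- B replaces A's per-key prefix scan by one table-building pass (split each part at its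
-- first '=' into a dict, then look up "fpr"/"uri"); objective: idiomatic, same cost.

-- ===== PORT A =====
-- loop body of A's `for part in parts` loop, named so the port reads cleanly
def pvAStep (st : Option String × Option String) (part : String) : Option String × Option String :=
  let st1 := if PySem.Str.slice part (some 0) (some 4) = "fpr=" then
      (some (PySem.Str.slice part (some 4) none), st.2) else st
  if PySem.Str.slice part (some 0) (some 4) = "uri=" then
      (st1.1, some (PySem.Str.slice part (some 4) none)) else st1

def parseOpenPGPFingerprintRecord (value : String) : Option String × Option String :=
  -- parts = value.split(";")  (";" is non-empty, so split? is always `some`)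
  match ((PySem.Str.split? value ";").getD []).foldl pvAStep ((none : Option String), (none : Option String)) with
  | (none, _) => (none, none)
  | (some f, none) => (some f, none)
  | (some f, some u) => (some f, some u)

-- ===== PORT B =====
-- loop body of B's dict-building loop
def pvBStep (d : PySem.Dict String String) (part : String) : PySem.Dict String String :=
  let i := PySem.Str.find part "="
  if i ≠ -1 then
    d.insert (PySem.Str.slice part none (some i)) (PySem.Str.slice part (some (i + 1)) none)
  else d

def parseOpenPGPFingerprintRecord_alt (value : String) : Option String × Option String :=
  let fields := ((PySem.Str.split? value ";").getD []).foldl pvBStep PySem.Dict.empty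
  match fields.get? "fpr" with
  | none => (none, none)
  | some f => (some f, fields.get? "uri")

-- ===== PRECONDITION & SPEC =====
def Spec_parseOpenPGPFingerprintRecord (value : String) (out : Option String × Option String) : Prop := out = parseOpenPGPFingerprintRecord_alt value
instance (value : String) (out : Option String × Option String) : Decidable (Spec_parseOpenPGPFingerprintRecord value out) := by unfold Spec_parseOpenPGPFingerprintRecord; infer_instance

-- ===== CLAIM (what is proved, stated in full; the proofs are below) =====
def Claim_equal_parseOpenPGPFingerprintRecord : Prop := ∀ (value : String), Dom_parseOpenPGPFingerprintRecord value → Spec_parseOpenPGPFingerprintRecord value (parseOpenPGPFingerprintRecord value)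

-- ===== LEMMAS AND PROOFS =====

-- [c] is a prefix of L.drop n exactly when L has character c at index n.
theorem pv_singleton_prefix_drop (L : List Char) (c : Char) (n : Nat) :
    [c] <+: L.drop n ↔ L[n]? = some c := by
  rw [← List.head?_drop]
  cases h : L.drop n <;> simp [List.cons_prefix_iff, eq_comm]

-- a character sitting at index n of L makes [c] an infix of L
theorem pv_infix_of_getElem (L : List Char) (c : Char) (n : Nat) (h : L[n]? = some c) :
    [c] <:+: L := by
  have hn : n < L.length := by
    by_contra hb
    rw [List.getElem?_eq_none (by omega)] at h
    simp at h
  have hc : L[n] = c := by simpa [List.getElem?_eq_getElem hn] using h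
  refine ⟨L.take n, L.drop (n + 1), ?_⟩
  rw [List.append_assoc]
  calc L.take n ++ ([c] ++ L.drop (n + 1)) = L.take n ++ L.drop n := by
        rw [List.drop_eq_getElem_cons hn, hc]; rfl
    _ = L := List.take_append_drop n L

-- A's prefix test part[0:4] == t, reduced to a take on the char list
theorem pv_slice04 (part : String) (t : String) :
    PySem.Str.slice part (some 0) (some 4) = t ↔ part.toList.take 4 = t.toList := by
  rw [String.ext_iff, PySem.Str.toList_slice, PySem.Chars.slice_eq_listSlice,
      PySem.List.slice_zero_start, PySem.List.slice_to _ (by norm_num : (0:Int) ≤ 4),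
      show ((4:Int)).toNat = 4 from rfl]

-- One part: A's pair update agrees with the dict lookups after B's dict update.
theorem pv_step (d : PySem.Dict String String) (part : String) :
    pvAStep (d.get? "fpr", d.get? "uri") part = ((pvBStep d part).get? "fpr", (pvBStep d part).get? "uri") := by
  by_cases hfind : PySem.Str.find part "=" = -1
  · -- part contains no '=': neither prefix test can fire, the dict is unchanged
    have hni : ¬ (['='] : List Char) <:+: part.toList := by
      rw [← PySem.Chars.find_eq_neg_one_iff]
      rw [PySem.Str.find_eq] at hfind
      exact hfind
    have hpref : ∀ t : String, t.toList[3]? = some '=' →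
        PySem.Str.slice part (some 0) (some 4) ≠ t := by
      intro t ht hc
      rw [pv_slice04] at hc
      apply hni
      refine pv_infix_of_getElem _ _ 3 ?_
      have := congrArg (fun l => l[3]?) hc
      simpa [List.getElem?_take, ht] using this
    unfold pvAStep pvBStep
    rw [if_neg (hpref "fpr=" (by decide)), if_neg (hpref "uri=" (by decide)),
        if_neg (not_not_intro hfind)]
  · -- part = k ++ "=" ++ v, split at the first '='
    have hi0 : 0 ≤ PySem.Str.find part "=" := by
      rw [PySem.Str.find_eq] at hfind ⊢
      exact (PySem.Chars.find_nonneg_iff _ _).mpr ((PySem.Chars.find_ne_neg_one_iff _ _).mp hfind)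
    set L := part.toList with hLdef
    set n := (PySem.Str.find part "=").toNat with hndef
    have hiN : PySem.Str.find part "=" = (n : Int) := (Int.toNat_of_nonneg hi0).symm
    have hfe : PySem.Str.find part "=" = PySem.Chars.find L ['='] := by
      rw [PySem.Str.find_eq]
      rfl
    obtain ⟨hpre, hmin⟩ := PySem.Chars.find_spec (s := L) (sub := ['=']) (hfe ▸ hi0)
    rw [show (PySem.Chars.find L ['=']).toNat = n by rw [← hfe]] at hpre hmin
    have hn : L[n]? = some '=' := (pv_singleton_prefix_drop L '=' n).mp hpre
    have hj : ∀ j, j < n → L[j]? ≠ some '=' := fun j hjn hc =>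
      hmin j hjn ((pv_singleton_prefix_drop L '=' j).mpr hc)
    have hnlen : n < L.length := by
      by_contra hb
      rw [List.getElem?_eq_none (by omega)] at hn
      simp at hn
    have hk : (PySem.Str.slice part none (some (PySem.Str.find part "="))).toList = L.take n := by
      rw [PySem.Str.toList_slice, PySem.Chars.slice_eq_listSlice, PySem.List.slice_to _ hi0]
    have hv : (PySem.Str.slice part (some (PySem.Str.find part "=" + 1)) none).toList = L.drop (n + 1) := by
      rw [PySem.Str.toList_slice, PySem.Chars.slice_eq_listSlice,
          PySem.List.slice_from _ (by omega)]
      congr 1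
      omega
    -- which key was found?
    by_cases hf : L.take 4 = ['f', 'p', 'r', '=']
    · -- the "fpr=" case: the first '=' is at index 3, key = "fpr", value = part[4:]
      have e0 : L[0]? = some 'f' := by have := congrArg (fun l => l[0]?) hf; simpa [List.getElem?_take] using this
      have e1 : L[1]? = some 'p' := by have := congrArg (fun l => l[1]?) hf; simpa [List.getElem?_take] using this
      have e2 : L[2]? = some 'r' := by have := congrArg (fun l => l[2]?) hf; simpa [List.getElem?_take] using this
      have e3 : L[3]? = some '=' := by have := congrArg (fun l => l[3]?) hf; simpa [List.getElem?_take] using this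
      have hn3 : n = 3 := by
        have h1 : ¬ n < 3 := by
          intro hlt
          interval_cases n <;> simp_all
        have h2 : ¬ 3 < n := fun hlt => (hj 3 hlt) e3
        omega
      have hkey : PySem.Str.slice part none (some (PySem.Str.find part "=")) = "fpr" := by
        rw [String.ext_iff, hk, hn3, show L.take 3 = (L.take 4).take 3 by rw [List.take_take]; norm_num, hf]
        decide
      have hval : PySem.Str.slice part (some (PySem.Str.find part "=" + 1)) none
          = PySem.Str.slice part (some 4) none := by
        rw [String.ext_iff, hv, hn3, PySem.Str.toList_slice, PySem.Chars.slice_eq_listSlice,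
            PySem.List.slice_from _ (by norm_num : (0:Int) ≤ 4),
            show ((4:Int)).toNat = 4 from rfl]
      have hcf : PySem.Str.slice part (some 0) (some 4) = "fpr=" := by
        rw [pv_slice04]; exact hf
      have hcu : PySem.Str.slice part (some 0) (some 4) ≠ "uri=" := by
        intro hc; rw [pv_slice04, hf] at hc; exact absurd hc (by decide)
      unfold pvAStep pvBStep
      rw [if_pos hcf, if_neg hcu, if_pos hfind, hkey, hval,
          PySem.Dict.get?_insert_self, PySem.Dict.get?_insert_of_ne _ _ (by decide : "uri" ≠ "fpr")]
    · by_cases hu : L.take 4 = ['u', 'r', 'i', '=']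
      · -- the "uri=" case, symmetric
        have e0 : L[0]? = some 'u' := by have := congrArg (fun l => l[0]?) hu; simpa [List.getElem?_take] using this
        have e1 : L[1]? = some 'r' := by have := congrArg (fun l => l[1]?) hu; simpa [List.getElem?_take] using this
        have e2 : L[2]? = some 'i' := by have := congrArg (fun l => l[2]?) hu; simpa [List.getElem?_take] using this
        have e3 : L[3]? = some '=' := by have := congrArg (fun l => l[3]?) hu; simpa [List.getElem?_take] using this
        have hn3 : n = 3 := by
          have h1 : ¬ n < 3 := by
            intro hlt
            interval_cases n <;> simp_all
          have h2 : ¬ 3 < n := fun hlt => (hj 3 hlt) e3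
          omega
        have hkey : PySem.Str.slice part none (some (PySem.Str.find part "=")) = "uri" := by
          rw [String.ext_iff, hk, hn3, show L.take 3 = (L.take 4).take 3 by rw [List.take_take]; norm_num, hu]
          decide
        have hval : PySem.Str.slice part (some (PySem.Str.find part "=" + 1)) none
            = PySem.Str.slice part (some 4) none := by
          rw [String.ext_iff, hv, hn3, PySem.Str.toList_slice, PySem.Chars.slice_eq_listSlice,
              PySem.List.slice_from _ (by norm_num : (0:Int) ≤ 4),
              show ((4:Int)).toNat = 4 from rfl]
        have hcu : PySem.Str.slice part (some 0) (some 4) = "uri=" := by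
          rw [pv_slice04]; exact hu
        have hcf : PySem.Str.slice part (some 0) (some 4) ≠ "fpr=" := by
          intro hc; rw [pv_slice04, hu] at hc; exact absurd hc (by decide)
        unfold pvAStep pvBStep
        rw [if_neg hcf, if_pos hcu, if_pos hfind, hkey, hval,
            PySem.Dict.get?_insert_self, PySem.Dict.get?_insert_of_ne _ _ (by decide : "fpr" ≠ "uri")]
      · -- neither key: A's state is untouched, B inserts under some other key
        have hkne : ∀ (t : String) (a b c : Char), t.toList = [a, b, c] → L.take 4 ≠ [a, b, c, '='] →
            PySem.Str.slice part none (some (PySem.Str.find part "=")) ≠ t := by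
          intro t a b c htl htk hc
          rw [String.ext_iff, hk, htl] at hc
          have hn3 : n = 3 := by
            have := congrArg List.length hc
            simp [List.length_take] at this
            omega
          apply htk
          have h3 : L.take 3 = [a, b, c] := by rw [← hn3]; exact hc
          rw [show (4:Nat) = 3 + 1 from rfl, List.take_add_one, h3,
              show L[3]? = some '=' from hn3 ▸ hn]
          rfl
        have hcf : PySem.Str.slice part (some 0) (some 4) ≠ "fpr=" := by
          intro hc; rw [pv_slice04] at hc; exact hf (by rw [hc]; decide)
        have hcu : PySem.Str.slice part (some 0) (some 4) ≠ "uri=" := by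
          intro hc; rw [pv_slice04] at hc; exact hu (by rw [hc]; decide)
        unfold pvAStep pvBStep
        rw [if_neg hcf, if_neg hcu, if_pos hfind,
            PySem.Dict.get?_insert_of_ne _ _ (Ne.symm (hkne "fpr" 'f' 'p' 'r' (by decide) hf)),
            PySem.Dict.get?_insert_of_ne _ _ (Ne.symm (hkne "uri" 'u' 'r' 'i' (by decide) hu))]

theorem pv_loop (parts : List String) (d : PySem.Dict String String) :
    parts.foldl pvAStep (d.get? "fpr", d.get? "uri")
      = ((parts.foldl pvBStep d).get? "fpr", (parts.foldl pvBStep d).get? "uri") := by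
  induction parts generalizing d with
  | nil => rfl
  | cons p ps ih =>
    simp only [List.foldl_cons, pv_step d p]
    exact ih _

-- ===== VERDICT (by name: the statement is the Claim_ definition above) =====
theorem parseOpenPGPFingerprintRecord_spec : Claim_equal_parseOpenPGPFingerprintRecord := by
  intro value _
  unfold Spec_parseOpenPGPFingerprintRecord parseOpenPGPFingerprintRecord parseOpenPGPFingerprintRecord_alt
  have h := pv_loop ((PySem.Str.split? value ";").getD []) PySem.Dict.empty
  simp only [PySem.Dict.get?_empty] at h
  rw [h]
  rcases hf : (((PySem.Str.split? value ";").getD []).foldl pvBStep PySem.Dict.empty).get? "fpr" with _ | f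
  · simp [hf]
  · rcases hu : (((PySem.Str.split? value ";").getD []).foldl pvBStep PySem.Dict.empty).get? "uri" with _ | u <;> simp [hf, hu]
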